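-- pv_equiv track=rewrite | github.com/gracexu222/cs455-Algorithms-Structured-Programming-2023-Fall | HW2/q3.py | modified_edit_distance
-- ===== SOURCE A (Python) =====
-- def modified_edit_distance(S, T):
--     m, n = len(S), len(T)
--     dp = [[0] * (n + 1) for _ in range(m + 1)]
--     ops = [[""] * (n + 1) for _ in range(m + 1)]
--
--     # Initialization
--     for i in range(m+1):
--         dp[i][0] = i
--         ops[i][0] = "D" * i
--     for j in range(n+1):
--         dp[0][j] = j
--         ops[0][j] = "I" * j
--
--     # Recurrence
--     for i in range(1, m+1):
--         for j in range(1, n+1):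
--             insert = dp[i][j-1] + 1
--             delete = dp[i-1][j] + 1
--             substitute = dp[i-1][j-1] + (0 if S[i-1] == T[j-1] else 1)
--
--             # Check for the transpose operation
--             if i > 1 and j > 1 and S[i-1] == T[j-2] and S[i-2] == T[j-1]:
--                 transpose = dp[i-2][j-2] + 1
--             else:
--                 transpose = float('inf')
--
--             # Update dp and operations table
--             min_op = min(insert, delete, substitute, transpose)
--             dp[i][j] = min_op
--
--             if min_op == insert:
--                 ops[i][j] = ops[i][j-1] + "I"
--             elif min_op == delete:
--                 ops[i][j] = ops[i-1][j] + "D"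
--             elif min_op == substitute:
--                 if S[i-1] != T[j-1]:
--                     ops[i][j] = ops[i-1][j-1] + "S"
--                 else:
--                     ops[i][j] = ops[i-1][j-1]
--             else:
--                 ops[i][j] = ops[i-2][j-2] + "T"
--
--     return dp[m][n], ops[m][n]
-- ===== SOURCE B (Python) =====
-- def modified_edit_distance(S, T):
--     # Faster: fill the integer dp table only (O(mn)), then one backtrack pass
--     # rebuilds the operation string with the same insert>delete>substitute>transpose priority.
--     m, n = len(S), len(T)
--     dp = [[0] * (n + 1) for _ in range(m + 1)]
--     for i in range(m + 1):
--         dp[i][0] = i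
--     for j in range(n + 1):
--         dp[0][j] = j
--     for i in range(1, m + 1):
--         for j in range(1, n + 1):
--             best = min(dp[i][j-1] + 1,
--                        dp[i-1][j] + 1,
--                        dp[i-1][j-1] + (0 if S[i-1] == T[j-1] else 1))
--             if i > 1 and j > 1 and S[i-1] == T[j-2] and S[i-2] == T[j-1]:
--                 best = min(best, dp[i-2][j-2] + 1)
--             dp[i][j] = best
--
--     rev = []  # operations from last to first
--     i, j = m, n
--     while i > 0 and j > 0:
--         cur = dp[i][j]
--         if cur == dp[i][j-1] + 1:
--             rev.append("I")
--             j -= 1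
--         elif cur == dp[i-1][j] + 1:
--             rev.append("D")
--             i -= 1
--         elif cur == dp[i-1][j-1] + (0 if S[i-1] == T[j-1] else 1):
--             if S[i-1] != T[j-1]:
--                 rev.append("S")
--             i -= 1
--             j -= 1
--         else:
--             rev.append("T")
--             i -= 2
--             j -= 2
--     rev.append("D" * i)
--     rev.append("I" * j)
--     return dp[m][n], "".join(reversed(rev))
-- ===== Notes on version B (the rewrite author's own statement) =====
-- stated objective: faster
-- what changed: B fills only the integer dp table and reconstructs the operation string by a single backtracking pass that replicates A's insert>delete>substitute>transpose priority, instead of A's per-cell string table whose concatenations cost O(m+n) each.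
import Mathlib
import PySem

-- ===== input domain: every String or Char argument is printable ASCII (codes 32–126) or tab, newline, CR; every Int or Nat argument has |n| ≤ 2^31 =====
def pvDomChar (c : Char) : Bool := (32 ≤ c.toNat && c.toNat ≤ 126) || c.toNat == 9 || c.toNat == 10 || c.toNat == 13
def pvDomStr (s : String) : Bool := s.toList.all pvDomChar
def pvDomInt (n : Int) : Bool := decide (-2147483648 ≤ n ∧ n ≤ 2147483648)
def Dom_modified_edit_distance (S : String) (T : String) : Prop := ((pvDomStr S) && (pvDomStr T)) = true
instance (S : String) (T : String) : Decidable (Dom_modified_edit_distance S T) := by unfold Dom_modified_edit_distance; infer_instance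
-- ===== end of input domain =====

-- B fills only the integer dp table and rebuilds the operation string by one backtracking pass
-- with A's insert>delete>substitute>transpose priority (objective: faster, no per-cell string table).

-- ===== PORT A =====
-- 2D-table accessors (Python list-of-lists indexing; all accesses in the ports are in range)
def pvGet2 (dp : List (List Int)) (i j : Nat) : Int := (dp.getD i []).getD j 0
def pvSet2 (dp : List (List Int)) (i j : Nat) (v : Int) : List (List Int) :=
  dp.set i ((dp.getD i []).set j v)
-- ops table: Python str modeled as List Char (concatenation = ++), joined by String.mk at return
def pvGetO (ops : List (List (List Char))) (i j : Nat) : List Char := (ops.getD i []).getD j []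
def pvSetO (ops : List (List (List Char))) (i j : Nat) (v : List Char) : List (List (List Char)) :=
  ops.set i ((ops.getD i []).set j v)

def modified_edit_distance (S : String) (T : String) : Int × String :=
  let s := S.toList
  let t := T.toList
  let m := s.length
  let n := t.length
  let dp0 : List (List Int) := List.replicate (m+1) (List.replicate (n+1) 0)
  let ops0 : List (List (List Char)) := List.replicate (m+1) (List.replicate (n+1) [])
  -- Initialization
  let dp1 := (List.range (m+1)).foldl (fun dp i => pvSet2 dp i 0 (i : Int)) dp0
  let ops1 := (List.range (m+1)).foldl (fun o i => pvSetO o i 0 (List.replicate i 'D')) ops0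
  let dp2 := (List.range (n+1)).foldl (fun dp j => pvSet2 dp 0 j (j : Int)) dp1
  let ops2 := (List.range (n+1)).foldl (fun o j => pvSetO o 0 j (List.replicate j 'I')) ops1
  -- Recurrence
  let st := (List.range' 1 m).foldl (fun st i =>
    (List.range' 1 n).foldl (fun st j =>
      let dp := st.1
      let ops := st.2
      let ins := pvGet2 dp i (j-1) + 1
      let del := pvGet2 dp (i-1) j + 1
      let sub := pvGet2 dp (i-1) (j-1) + (if s.getD (i-1) ' ' = t.getD (j-1) ' ' then 0 else 1)
      -- float('inf') modeled as Option Int: none never wins min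
      let trans : Option Int :=
        if 1 < i ∧ 1 < j ∧ s.getD (i-1) ' ' = t.getD (j-2) ' ' ∧ s.getD (i-2) ' ' = t.getD (j-1) ' '
        then some (pvGet2 dp (i-2) (j-2) + 1) else none
      let minOp := match trans with
        | some tv => min (min (min ins del) sub) tv
        | none => min (min ins del) sub
      let dp' := pvSet2 dp i j minOp
      let opsv : List Char :=
        if minOp = ins then pvGetO ops i (j-1) ++ ['I']
        else if minOp = del then pvGetO ops (i-1) j ++ ['D']
        else if minOp = sub then
          (if s.getD (i-1) ' ' ≠ t.getD (j-1) ' ' then pvGetO ops (i-1) (j-1) ++ ['S']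
           else pvGetO ops (i-1) (j-1))
        else pvGetO ops (i-2) (j-2) ++ ['T']
      (dp', pvSetO ops i j opsv)) st) (dp2, ops2)
  (pvGet2 st.1 m n, String.mk (pvGetO st.2 m n))

-- ===== PORT B =====
-- backtracking pass of Source B: the reversed op list `rev` of the Python while-loop is kept in
-- final (unreversed) order, so Python's trailing reversed-join is the identity here
def pvBack (s t : List Char) (dp : List (List Int)) : Nat → Nat → List Char → List Char
  | 0, j, rev => List.replicate j 'I' ++ rev
  | i+1, 0, rev => List.replicate (i+1) 'D' ++ rev
  | i+1, j+1, rev =>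
    let cur := pvGet2 dp (i+1) (j+1)
    if cur = pvGet2 dp (i+1) j + 1 then pvBack s t dp (i+1) j ('I' :: rev)
    else if cur = pvGet2 dp i (j+1) + 1 then pvBack s t dp i (j+1) ('D' :: rev)
    else if cur = pvGet2 dp i j + (if s.getD i ' ' = t.getD j ' ' then 0 else 1) then
      pvBack s t dp i j (if s.getD i ' ' ≠ t.getD j ' ' then 'S' :: rev else rev)
    else pvBack s t dp (i-1) (j-1) ('T' :: rev)
  termination_by i j => i + j
  decreasing_by all_goals omega

def modified_edit_distance_alt (S : String) (T : String) : Int × String :=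
  let s := S.toList
  let t := T.toList
  let m := s.length
  let n := t.length
  let dp0 : List (List Int) := List.replicate (m+1) (List.replicate (n+1) 0)
  let dp1 := (List.range (m+1)).foldl (fun dp i => pvSet2 dp i 0 (i : Int)) dp0
  let dp2 := (List.range (n+1)).foldl (fun dp j => pvSet2 dp 0 j (j : Int)) dp1
  let dp := (List.range' 1 m).foldl (fun dp i =>
    (List.range' 1 n).foldl (fun dp j =>
      let base := min (min (pvGet2 dp i (j-1) + 1) (pvGet2 dp (i-1) j + 1))
        (pvGet2 dp (i-1) (j-1) + (if s.getD (i-1) ' ' = t.getD (j-1) ' ' then 0 else 1))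
      let best :=
        if 1 < i ∧ 1 < j ∧ s.getD (i-1) ' ' = t.getD (j-2) ' ' ∧ s.getD (i-2) ' ' = t.getD (j-1) ' '
        then min base (pvGet2 dp (i-2) (j-2) + 1) else base
      pvSet2 dp i j best) dp) dp2
  (pvGet2 dp m n, String.mk (pvBack s t dp m n []))


-- ===== PRECONDITION & SPEC =====
def Spec_modified_edit_distance (S : String) (T : String) (out : Int × String) : Prop := out = modified_edit_distance_alt S T
instance (S : String) (T : String) (out : Int × String) : Decidable (Spec_modified_edit_distance S T out) := by unfold Spec_modified_edit_distance; infer_instance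

-- ===== CLAIM (what is proved, stated in full; the proofs are below) =====
def Claim_equal_modified_edit_distance : Prop := ∀ (S : String) (T : String), Dom_modified_edit_distance S T → Spec_modified_edit_distance S T (modified_edit_distance S T)

-- ===== LEMMAS AND PROOFS =====

-- recursive characterisation of the dp value at cell (i, j)
def dpF (s t : List Char) : Nat → Nat → Int
  | i, 0 => (i : Int)
  | 0, j => (j : Int)
  | i+1, j+1 =>
    let ins := dpF s t (i+1) j + 1
    let del := dpF s t i (j+1) + 1
    let sub := dpF s t i j + (if s.getD i ' ' = t.getD j ' ' then 0 else 1)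
    let trans : Option Int :=
      if 1 < i+1 ∧ 1 < j+1 ∧ s.getD i ' ' = t.getD (j-1) ' ' ∧ s.getD (i-1) ' ' = t.getD j ' '
      then some (dpF s t (i-1) (j-1) + 1) else none
    match trans with
    | some tv => min (min (min ins del) sub) tv
    | none => min (min ins del) sub
  termination_by i j => i + j
  decreasing_by all_goals omega

-- recursive characterisation of A's ops string at cell (i, j)
def opsF (s t : List Char) : Nat → Nat → List Char
  | i, 0 => List.replicate i 'D'
  | 0, j => List.replicate j 'I'
  | i+1, j+1 =>
    let ins := dpF s t (i+1) j + 1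
    let del := dpF s t i (j+1) + 1
    let sub := dpF s t i j + (if s.getD i ' ' = t.getD j ' ' then 0 else 1)
    let minOp := dpF s t (i+1) (j+1)
    if minOp = ins then opsF s t (i+1) j ++ ['I']
    else if minOp = del then opsF s t i (j+1) ++ ['D']
    else if minOp = sub then
      (if s.getD i ' ' ≠ t.getD j ' ' then opsF s t i j ++ ['S'] else opsF s t i j)
    else opsF s t (i-1) (j-1) ++ ['T']
  termination_by i j => i + j
  decreasing_by all_goals omega

-- shape of an (m+1) × (n+1) table
def pvShape {α : Type} (m n : Nat) (dp : List (List α)) : Prop :=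
  dp.length = m + 1 ∧ ∀ i, i < m + 1 → (dp.getD i []).length = n + 1

-- generic cell lemmas about the set-then-get pattern of pvSet2 / pvSetO
theorem gg_len {α : Type} (dp : List (List α)) (i j : Nat) (v : α) (i' : Nat) :
    ((dp.set i ((dp.getD i []).set j v)).getD i' []).length = (dp.getD i' []).length := by
  by_cases hlt : i < dp.length
  · by_cases hi : i' = i
    · subst hi; simp [List.getD_eq_getElem?_getD, hlt]
    · simp [List.getD_eq_getElem?_getD, List.getElem?_set_ne (fun h => hi h.symm)]
  · rw [List.set_eq_of_length_le (by omega)]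

theorem gg_get_ne {α : Type} (d : α) (dp : List (List α)) {i j i' j' : Nat} (v : α)
    (h : i' ≠ i ∨ j' ≠ j) :
    ((dp.set i ((dp.getD i []).set j v)).getD i' []).getD j' d = (dp.getD i' []).getD j' d := by
  by_cases hi : i' = i
  · subst hi
    have hj : j' ≠ j := h.resolve_left (by simp)
    by_cases hlt : i' < dp.length
    · simp [List.getD_eq_getElem?_getD, hlt, List.getElem?_set_ne (fun hh => hj hh.symm)]
    · rw [List.set_eq_of_length_le (by omega)]
  · simp [List.getD_eq_getElem?_getD, List.getElem?_set_ne (fun hh => hi hh.symm)]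

theorem gg_get_eq {α : Type} (d : α) (dp : List (List α)) {i j : Nat} (v : α)
    (hi : i < dp.length) (hj : j < (dp.getD i []).length) :
    ((dp.set i ((dp.getD i []).set j v)).getD i []).getD j d = v := by
  have hj' : j < dp[i].length := by
    rwa [List.getD_eq_getElem dp [] hi] at hj
  simp [List.getD_eq_getElem?_getD, hi, List.getElem?_set_self hj']

theorem pvShape_set2 {m n : Nat} {dp : List (List Int)} (h : pvShape m n dp) (i j : Nat) (v : Int) :
    pvShape m n (pvSet2 dp i j v) :=
  ⟨by simp [pvSet2, h.1], fun i' hi' => by rw [pvSet2, gg_len]; exact h.2 i' hi'⟩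

theorem pvShapeO_set {m n : Nat} {ops : List (List (List Char))} (h : pvShape m n ops)
    (i j : Nat) (v : List Char) : pvShape m n (pvSetO ops i j v) :=
  ⟨by simp [pvSetO, h.1], fun i' hi' => by rw [pvSetO, gg_len]; exact h.2 i' hi'⟩

theorem pvGet2_set_ne {dp : List (List Int)} {i j i' j' : Nat} (v : Int) (h : i' ≠ i ∨ j' ≠ j) :
    pvGet2 (pvSet2 dp i j v) i' j' = pvGet2 dp i' j' := gg_get_ne 0 dp v h

theorem pvGet2_set_eq {m n : Nat} {dp : List (List Int)} (hS : pvShape m n dp) {i j : Nat}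
    (v : Int) (hi : i < m + 1) (hj : j < n + 1) : pvGet2 (pvSet2 dp i j v) i j = v :=
  gg_get_eq 0 dp v (by rw [hS.1]; omega) (by rw [hS.2 i hi]; omega)

theorem pvGetO_set_ne {ops : List (List (List Char))} {i j i' j' : Nat} (v : List Char)
    (h : i' ≠ i ∨ j' ≠ j) : pvGetO (pvSetO ops i j v) i' j' = pvGetO ops i' j' := gg_get_ne [] ops v h

theorem pvGetO_set_eq {m n : Nat} {ops : List (List (List Char))} (hS : pvShape m n ops)
    {i j : Nat} (v : List Char) (hi : i < m + 1) (hj : j < n + 1) :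
    pvGetO (pvSetO ops i j v) i j = v :=
  gg_get_eq [] ops v (by rw [hS.1]; omega) (by rw [hS.2 i hi]; omega)

-- characterisation of the two initialization loops (generic in the cell type)
theorem foldl_initCol {α : Type} (f : Nat → α) (d : α) {m n : Nat} :
    ∀ (k : Nat) (dp : List (List α)), k ≤ m + 1 → pvShape m n dp →
      pvShape m n ((List.range k).foldl (fun dp i => dp.set i ((dp.getD i []).set 0 (f i))) dp) ∧
      ∀ i' j', (((List.range k).foldl (fun dp i => dp.set i ((dp.getD i []).set 0 (f i))) dp).getD i' []).getD j' d
        = if j' = 0 ∧ i' < k then f i' else (dp.getD i' []).getD j' d := by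
  intro k
  induction k with
  | zero => intro dp _ hS; simpa using hS
  | succ k ih =>
    intro dp hk hS
    rw [List.range_succ, List.foldl_append]
    simp only [List.foldl_cons, List.foldl_nil]
    obtain ⟨ihS, ihget⟩ := ih dp (by omega) hS
    constructor
    · exact ⟨by simpa [List.length_set] using ihS.1, fun i' hi' => by rw [gg_len]; exact ihS.2 i' hi'⟩
    · intro i' j'
      by_cases hcell : i' = k ∧ j' = 0
      · obtain ⟨rfl, rfl⟩ := hcell
        rw [gg_get_eq d _ _ (by rw [ihS.1]; omega) (by rw [ihS.2 i' (by omega)]; omega)]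
        simp [hk]
      · rw [gg_get_ne d _ _ (by tauto), ihget i' j']
        have hiff : (j' = 0 ∧ i' < k + 1) ↔ (j' = 0 ∧ i' < k) := by
          constructor
          · rintro ⟨rfl, h⟩
            have : i' ≠ k := fun he => hcell ⟨he, rfl⟩
            exact ⟨rfl, by omega⟩
          · rintro ⟨rfl, h⟩; exact ⟨rfl, by omega⟩
        simp only [hiff]

theorem foldl_initRow {α : Type} (f : Nat → α) (d : α) {m n : Nat} :
    ∀ (k : Nat) (dp : List (List α)), k ≤ n + 1 → pvShape m n dp →
      pvShape m n ((List.range k).foldl (fun dp j => dp.set 0 ((dp.getD 0 []).set j (f j))) dp) ∧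
      ∀ i' j', (((List.range k).foldl (fun dp j => dp.set 0 ((dp.getD 0 []).set j (f j))) dp).getD i' []).getD j' d
        = if i' = 0 ∧ j' < k then f j' else (dp.getD i' []).getD j' d := by
  intro k
  induction k with
  | zero => intro dp _ hS; simpa using hS
  | succ k ih =>
    intro dp hk hS
    rw [List.range_succ, List.foldl_append]
    simp only [List.foldl_cons, List.foldl_nil]
    obtain ⟨ihS, ihget⟩ := ih dp (by omega) hS
    constructor
    · exact ⟨by simpa [List.length_set] using ihS.1, fun i' hi' => by rw [gg_len]; exact ihS.2 i' hi'⟩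
    · intro i' j'
      by_cases hcell : i' = 0 ∧ j' = k
      · obtain ⟨rfl, rfl⟩ := hcell
        rw [gg_get_eq d _ _ (by rw [ihS.1]; omega) (by rw [ihS.2 0 (by omega)]; omega)]
        simp [hk]
      · rw [gg_get_ne d _ _ (by tauto), ihget i' j']
        have hiff : (i' = 0 ∧ j' < k + 1) ↔ (i' = 0 ∧ j' < k) := by
          constructor
          · rintro ⟨rfl, h⟩
            have : j' ≠ k := fun he => hcell ⟨rfl, he⟩
            exact ⟨rfl, by omega⟩
          · rintro ⟨rfl, h⟩; exact ⟨rfl, by omega⟩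
        simp only [hiff]

-- named copies of the loop bodies of the two ports (definitionally equal to the inline lambdas)
def stepB (s t : List Char) (i : Nat) (dp : List (List Int)) (j : Nat) : List (List Int) :=
  let base := min (min (pvGet2 dp i (j-1) + 1) (pvGet2 dp (i-1) j + 1))
    (pvGet2 dp (i-1) (j-1) + (if s.getD (i-1) ' ' = t.getD (j-1) ' ' then 0 else 1))
  let best :=
    if 1 < i ∧ 1 < j ∧ s.getD (i-1) ' ' = t.getD (j-2) ' ' ∧ s.getD (i-2) ' ' = t.getD (j-1) ' '
    then min base (pvGet2 dp (i-2) (j-2) + 1) else base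
  pvSet2 dp i j best

def stepA (s t : List Char) (i : Nat)
    (st : List (List Int) × List (List (List Char))) (j : Nat) :
    List (List Int) × List (List (List Char)) :=
  let dp := st.1
  let ops := st.2
  let ins := pvGet2 dp i (j-1) + 1
  let del := pvGet2 dp (i-1) j + 1
  let sub := pvGet2 dp (i-1) (j-1) + (if s.getD (i-1) ' ' = t.getD (j-1) ' ' then 0 else 1)
  let trans : Option Int :=
    if 1 < i ∧ 1 < j ∧ s.getD (i-1) ' ' = t.getD (j-2) ' ' ∧ s.getD (i-2) ' ' = t.getD (j-1) ' '
    then some (pvGet2 dp (i-2) (j-2) + 1) else none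
  let minOp := match trans with
    | some tv => min (min (min ins del) sub) tv
    | none => min (min ins del) sub
  let dp' := pvSet2 dp i j minOp
  let opsv : List Char :=
    if minOp = ins then pvGetO ops i (j-1) ++ ['I']
    else if minOp = del then pvGetO ops (i-1) j ++ ['D']
    else if minOp = sub then
      (if s.getD (i-1) ' ' ≠ t.getD (j-1) ' ' then pvGetO ops (i-1) (j-1) ++ ['S']
       else pvGetO ops (i-1) (j-1))
    else pvGetO ops (i-2) (j-2) ++ ['T']
  (dp', pvSetO ops i j opsv)

-- "all cells already processed at position (i, j) of the row-major sweep hold the dpF / opsF value"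
def dpOK (s t : List Char) (dp : List (List Int)) (i j : Nat) : Prop :=
  ∀ i' j', i' ≤ s.length → j' ≤ t.length →
    (i' = 0 ∨ j' = 0 ∨ i' < i ∨ (i' = i ∧ j' < j)) → pvGet2 dp i' j' = dpF s t i' j'

def opsOK (s t : List Char) (ops : List (List (List Char))) (i j : Nat) : Prop :=
  ∀ i' j', i' ≤ s.length → j' ≤ t.length →
    (i' = 0 ∨ j' = 0 ∨ i' < i ∨ (i' = i ∧ j' < j)) → pvGetO ops i' j' = opsF s t i' j'

-- the value written by stepB at cell (i, j) is dpF s t i j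
theorem bestB_eq (s t : List Char) {dp : List (List Int)} {i j : Nat}
    (hOK : dpOK s t dp i j) (hi : 1 ≤ i) (him : i ≤ s.length) (hj : 1 ≤ j) (hjn : j ≤ t.length) :
    (if 1 < i ∧ 1 < j ∧ s.getD (i-1) ' ' = t.getD (j-2) ' ' ∧ s.getD (i-2) ' ' = t.getD (j-1) ' '
     then min (min (min (pvGet2 dp i (j-1) + 1) (pvGet2 dp (i-1) j + 1))
        (pvGet2 dp (i-1) (j-1) + (if s.getD (i-1) ' ' = t.getD (j-1) ' ' then 0 else 1)))
        (pvGet2 dp (i-2) (j-2) + 1)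
     else min (min (pvGet2 dp i (j-1) + 1) (pvGet2 dp (i-1) j + 1))
        (pvGet2 dp (i-1) (j-1) + (if s.getD (i-1) ' ' = t.getD (j-1) ' ' then 0 else 1)))
    = dpF s t i j := by
  obtain ⟨i₀, rfl⟩ : ∃ i₀, i = i₀ + 1 := ⟨i - 1, by omega⟩
  obtain ⟨j₀, rfl⟩ : ∃ j₀, j = j₀ + 1 := ⟨j - 1, by omega⟩
  have e2 : ∀ k : Nat, k + 1 - 2 = k - 1 := fun k => by omega
  have r1 : pvGet2 dp (i₀+1) j₀ = dpF s t (i₀+1) j₀ := hOK _ _ (by omega) (by omega) (by omega)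
  have r2 : pvGet2 dp i₀ (j₀+1) = dpF s t i₀ (j₀+1) := hOK _ _ (by omega) (by omega) (by omega)
  have r3 : pvGet2 dp i₀ j₀ = dpF s t i₀ j₀ := hOK _ _ (by omega) (by omega) (by omega)
  have r4 : pvGet2 dp (i₀-1) (j₀-1) = dpF s t (i₀-1) (j₀-1) :=
    hOK _ _ (by omega) (by omega) (by omega)
  simp only [Nat.add_sub_cancel, e2]
  rw [r1, r2, r3, r4, dpF]
  by_cases hg : 1 < i₀+1 ∧ 1 < j₀+1 ∧ s.getD i₀ ' ' = t.getD (j₀-1) ' ' ∧ s.getD (i₀-1) ' ' = t.getD j₀ ' '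
  · simp only [if_pos hg]
  · simp only [if_neg hg]

-- the value written by stepA at cell (i, j) is dpF s t i j (Python's float('inf') branch as Option)
theorem minA_eq (s t : List Char) {dp : List (List Int)} {i j : Nat}
    (hOK : dpOK s t dp i j) (hi : 1 ≤ i) (him : i ≤ s.length) (hj : 1 ≤ j) (hjn : j ≤ t.length) :
    (match (if 1 < i ∧ 1 < j ∧ s.getD (i-1) ' ' = t.getD (j-2) ' ' ∧ s.getD (i-2) ' ' = t.getD (j-1) ' '
            then some (pvGet2 dp (i-2) (j-2) + 1) else none : Option Int) with
     | some tv => min (min (min (pvGet2 dp i (j-1) + 1) (pvGet2 dp (i-1) j + 1))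
        (pvGet2 dp (i-1) (j-1) + (if s.getD (i-1) ' ' = t.getD (j-1) ' ' then 0 else 1))) tv
     | none => min (min (pvGet2 dp i (j-1) + 1) (pvGet2 dp (i-1) j + 1))
        (pvGet2 dp (i-1) (j-1) + (if s.getD (i-1) ' ' = t.getD (j-1) ' ' then 0 else 1)))
    = dpF s t i j := by
  have h := bestB_eq s t hOK hi him hj hjn
  by_cases hg : 1 < i ∧ 1 < j ∧ s.getD (i-1) ' ' = t.getD (j-2) ' ' ∧ s.getD (i-2) ' ' = t.getD (j-1) ' '
  · rw [if_pos hg] at h ⊢; exact h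
  · rw [if_neg hg] at h ⊢; exact h

theorem stepB_correct (s t : List Char) {dp : List (List Int)} {i j : Nat}
    (hS : pvShape s.length t.length dp) (hOK : dpOK s t dp i j)
    (hi : 1 ≤ i) (him : i ≤ s.length) (hj : 1 ≤ j) (hjn : j ≤ t.length) :
    pvShape s.length t.length (stepB s t i dp j) ∧ dpOK s t (stepB s t i dp j) i (j+1) := by
  have hval := bestB_eq s t hOK hi him hj hjn
  refine ⟨pvShape_set2 hS _ _ _, ?_⟩
  intro i' j' hi' hj' hproc
  simp only [stepB]
  by_cases hc : i' = i ∧ j' = j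
  · obtain ⟨rfl, rfl⟩ := hc
    rw [pvGet2_set_eq hS _ (by omega) (by omega)]
    exact hval
  · rw [pvGet2_set_ne _ (by tauto)]
    exact hOK i' j' hi' hj' (by omega)

theorem stepA_correct (s t : List Char) {dp : List (List Int)} {ops : List (List (List Char))}
    {i j : Nat} (hSd : pvShape s.length t.length dp) (hSo : pvShape s.length t.length ops)
    (hdp : dpOK s t dp i j) (hops : opsOK s t ops i j)
    (hi : 1 ≤ i) (him : i ≤ s.length) (hj : 1 ≤ j) (hjn : j ≤ t.length) :
    pvShape s.length t.length (stepA s t i (dp, ops) j).1 ∧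
    pvShape s.length t.length (stepA s t i (dp, ops) j).2 ∧
    dpOK s t (stepA s t i (dp, ops) j).1 i (j+1) ∧ opsOK s t (stepA s t i (dp, ops) j).2 i (j+1) := by
  have hval := minA_eq s t hdp hi him hj hjn
  obtain ⟨i₀, rfl⟩ : ∃ i₀, i = i₀ + 1 := ⟨i - 1, by omega⟩
  obtain ⟨j₀, rfl⟩ : ∃ j₀, j = j₀ + 1 := ⟨j - 1, by omega⟩
  have e2 : ∀ k : Nat, k + 1 - 2 = k - 1 := fun k => by omega
  -- the ops value written at (i, j) is opsF s t i j
  have hopsv : (stepA s t (i₀+1) (dp, ops) (j₀+1)).2 = pvSetO ops (i₀+1) (j₀+1) (opsF s t (i₀+1) (j₀+1)) := by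
    have o1 : pvGetO ops (i₀+1) j₀ = opsF s t (i₀+1) j₀ := hops _ _ (by omega) (by omega) (by omega)
    have o2 : pvGetO ops i₀ (j₀+1) = opsF s t i₀ (j₀+1) := hops _ _ (by omega) (by omega) (by omega)
    have o3 : pvGetO ops i₀ j₀ = opsF s t i₀ j₀ := hops _ _ (by omega) (by omega) (by omega)
    have o4 : pvGetO ops (i₀-1) (j₀-1) = opsF s t (i₀-1) (j₀-1) :=
      hops _ _ (by omega) (by omega) (by omega)
    have r1 : pvGet2 dp (i₀+1) j₀ = dpF s t (i₀+1) j₀ := hdp _ _ (by omega) (by omega) (by omega)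
    have r2 : pvGet2 dp i₀ (j₀+1) = dpF s t i₀ (j₀+1) := hdp _ _ (by omega) (by omega) (by omega)
    have r3 : pvGet2 dp i₀ j₀ = dpF s t i₀ j₀ := hdp _ _ (by omega) (by omega) (by omega)
    simp only [stepA, e2, Nat.add_sub_cancel] at hval ⊢
    rw [hval, r1, r2, r3, o1, o2, o3, o4]
    rw [opsF]
  have hdpv : (stepA s t (i₀+1) (dp, ops) (j₀+1)).1 = pvSet2 dp (i₀+1) (j₀+1) (dpF s t (i₀+1) (j₀+1)) := by
    simp only [stepA, e2, Nat.add_sub_cancel] at hval ⊢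
    rw [hval]
  refine ⟨?_, ?_, ?_, ?_⟩
  · rw [hdpv]; exact pvShape_set2 hSd _ _ _
  · rw [hopsv]; exact pvShapeO_set hSo _ _ _
  · intro i' j' hi' hj' hproc
    rw [hdpv]
    by_cases hc : i' = i₀+1 ∧ j' = j₀+1
    · obtain ⟨rfl, rfl⟩ := hc
      rw [pvGet2_set_eq hSd _ (by omega) (by omega)]
    · rw [pvGet2_set_ne _ (by tauto)]
      exact hdp i' j' hi' hj' (by omega)
  · intro i' j' hi' hj' hproc
    rw [hopsv]
    by_cases hc : i' = i₀+1 ∧ j' = j₀+1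
    · obtain ⟨rfl, rfl⟩ := hc
      rw [pvGetO_set_eq hSo _ (by omega) (by omega)]
    · rw [pvGetO_set_ne _ (by tauto)]
      exact hops i' j' hi' hj' (by omega)

theorem innerB_correct (s t : List Char) (i : Nat) (hi : 1 ≤ i) (him : i ≤ s.length) :
    ∀ (k j : Nat) (dp : List (List Int)), 1 ≤ j → j + k = t.length + 1 →
      pvShape s.length t.length dp → dpOK s t dp i j →
      pvShape s.length t.length ((List.range' j k).foldl (stepB s t i) dp) ∧
      dpOK s t ((List.range' j k).foldl (stepB s t i) dp) i (t.length + 1) := by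
  intro k
  induction k with
  | zero =>
    intro j dp h1 h2 hS hOK
    have : j = t.length + 1 := by omega
    subst this
    exact ⟨hS, hOK⟩
  | succ k ih =>
    intro j dp h1 h2 hS hOK
    rw [List.range'_succ, List.foldl_cons]
    obtain ⟨hS', hOK'⟩ := stepB_correct s t hS hOK hi him h1 (by omega)
    exact ih (j+1) (stepB s t i dp j) (by omega) (by omega) hS' hOK'

theorem outerB_correct (s t : List Char) :
    ∀ (k i : Nat) (dp : List (List Int)), 1 ≤ i → i + k = s.length + 1 →
      pvShape s.length t.length dp → dpOK s t dp i 1 →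
      pvShape s.length t.length
        ((List.range' i k).foldl (fun dp i => (List.range' 1 t.length).foldl (stepB s t i) dp) dp) ∧
      dpOK s t
        ((List.range' i k).foldl (fun dp i => (List.range' 1 t.length).foldl (stepB s t i) dp) dp)
        (s.length + 1) 1 := by
  intro k
  induction k with
  | zero =>
    intro i dp h1 h2 hS hOK
    have : i = s.length + 1 := by omega
    subst this
    exact ⟨hS, hOK⟩
  | succ k ih =>
    intro i dp h1 h2 hS hOK
    rw [List.range'_succ, List.foldl_cons]
    obtain ⟨hS', hOK'⟩ := innerB_correct s t i h1 (by omega) t.length 1 dp (by omega) (by omega) hS hOK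
    refine ih (i+1) _ (by omega) (by omega) hS' ?_
    intro i' j' hi' hj' hproc
    exact hOK' i' j' hi' hj' (by omega)

theorem innerA_correct (s t : List Char) (i : Nat) (hi : 1 ≤ i) (him : i ≤ s.length) :
    ∀ (k j : Nat) (st : List (List Int) × List (List (List Char))), 1 ≤ j → j + k = t.length + 1 →
      pvShape s.length t.length st.1 → pvShape s.length t.length st.2 →
      dpOK s t st.1 i j → opsOK s t st.2 i j →
      pvShape s.length t.length ((List.range' j k).foldl (stepA s t i) st).1 ∧
      pvShape s.length t.length ((List.range' j k).foldl (stepA s t i) st).2 ∧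
      dpOK s t ((List.range' j k).foldl (stepA s t i) st).1 i (t.length + 1) ∧
      opsOK s t ((List.range' j k).foldl (stepA s t i) st).2 i (t.length + 1) := by
  intro k
  induction k with
  | zero =>
    intro j st h1 h2 hSd hSo hdp hops
    have : j = t.length + 1 := by omega
    subst this
    exact ⟨hSd, hSo, hdp, hops⟩
  | succ k ih =>
    intro j st h1 h2 hSd hSo hdp hops
    rw [List.range'_succ, List.foldl_cons]
    obtain ⟨hSd', hSo', hdp', hops'⟩ := stepA_correct s t hSd hSo hdp hops hi him h1 (by omega)
    exact ih (j+1) (stepA s t i (st.1, st.2) j) (by omega) (by omega) hSd' hSo' hdp' hops'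

theorem outerA_correct (s t : List Char) :
    ∀ (k i : Nat) (st : List (List Int) × List (List (List Char))), 1 ≤ i → i + k = s.length + 1 →
      pvShape s.length t.length st.1 → pvShape s.length t.length st.2 →
      dpOK s t st.1 i 1 → opsOK s t st.2 i 1 →
      dpOK s t ((List.range' i k).foldl (fun st i => (List.range' 1 t.length).foldl (stepA s t i) st) st).1 (s.length + 1) 1 ∧
      opsOK s t ((List.range' i k).foldl (fun st i => (List.range' 1 t.length).foldl (stepA s t i) st) st).2 (s.length + 1) 1 := by
  intro k
  induction k with
  | zero =>
    intro i st h1 h2 _ _ hdp hops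
    have : i = s.length + 1 := by omega
    subst this
    exact ⟨hdp, hops⟩
  | succ k ih =>
    intro i st h1 h2 hSd hSo hdp hops
    rw [List.range'_succ, List.foldl_cons]
    obtain ⟨hSd', hSo', hdp', hops'⟩ := innerA_correct s t i h1 (by omega) t.length 1 st (by omega) (by omega) hSd hSo hdp hops
    refine ih (i+1) _ (by omega) (by omega) hSd' hSo' ?_ ?_
    · intro i' j' hi' hj' hproc
      exact hdp' i' j' hi' hj' (by omega)
    · intro i' j' hi' hj' hproc
      exact hops' i' j' hi' hj' (by omega)

-- the backtracking pass of B reproduces A's ops string, cell by cell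
theorem back_eq (s t : List Char) (dp : List (List Int))
    (hdp : ∀ i j, i ≤ s.length → j ≤ t.length → pvGet2 dp i j = dpF s t i j) :
    ∀ (N i j : Nat) (rev : List Char), i + j ≤ N → i ≤ s.length → j ≤ t.length →
      pvBack s t dp i j rev = opsF s t i j ++ rev := by
  intro N
  induction N with
  | zero =>
    intro i j rev hN him hjn
    have hi : i = 0 := by omega
    have hj : j = 0 := by omega
    subst hi; subst hj
    simp [pvBack, opsF]
  | succ N ih =>
    intro i j rev hN him hjn
    match i, j with
    | 0, 0 => simp [pvBack, opsF]
    | 0, j+1 => simp [pvBack, opsF]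
    | i+1, 0 => simp [pvBack, opsF]
    | i+1, j+1 =>
      have c0 : pvGet2 dp (i+1) (j+1) = dpF s t (i+1) (j+1) := hdp _ _ him hjn
      have c1 : pvGet2 dp (i+1) j = dpF s t (i+1) j := hdp _ _ him (by omega)
      have c2 : pvGet2 dp i (j+1) = dpF s t i (j+1) := hdp _ _ (by omega) hjn
      have c3 : pvGet2 dp i j = dpF s t i j := hdp _ _ (by omega) (by omega)
      rw [pvBack, opsF, c0, c1, c2, c3]
      by_cases h1 : dpF s t (i+1) (j+1) = dpF s t (i+1) j + 1
      · simp only [if_pos h1]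
        rw [ih (i+1) j ('I'::rev) (by omega) him (by omega)]
        simp
      · simp only [if_neg h1]
        by_cases h2 : dpF s t (i+1) (j+1) = dpF s t i (j+1) + 1
        · simp only [if_pos h2]
          rw [ih i (j+1) ('D'::rev) (by omega) (by omega) hjn]
          simp
        · simp only [if_neg h2]
          by_cases h3 : dpF s t (i+1) (j+1) = dpF s t i j + (if s.getD i ' ' = t.getD j ' ' then 0 else 1)
          · simp only [if_pos h3]
            by_cases hc : s.getD i ' ' = t.getD j ' '
            · simp only [if_neg (not_not_intro hc)]
              exact ih i j rev (by omega) (by omega) (by omega)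
            · simp only [if_pos hc]
              rw [ih i j ('S'::rev) (by omega) (by omega) (by omega)]
              simp
          · simp only [if_neg h3]
            rw [ih (i-1) (j-1) ('T'::rev) (by omega) (by omega) (by omega)]
            simp

-- named copies of the initialization results and of the two fills (definitionally equal to the ports)
def initDPd (s t : List Char) : List (List Int) :=
  (List.range (t.length+1)).foldl (fun dp j => pvSet2 dp 0 j ((j:Nat) : Int))
    ((List.range (s.length+1)).foldl (fun dp i => pvSet2 dp i 0 ((i:Nat) : Int))
      (List.replicate (s.length+1) (List.replicate (t.length+1) (0:Int))))

def initOPd (s t : List Char) : List (List (List Char)) :=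
  (List.range (t.length+1)).foldl (fun o j => pvSetO o 0 j (List.replicate j 'I'))
    ((List.range (s.length+1)).foldl (fun o i => pvSetO o i 0 (List.replicate i 'D'))
      (List.replicate (s.length+1) (List.replicate (t.length+1) ([] : List Char))))

def fillBd (s t : List Char) : List (List Int) :=
  (List.range' 1 s.length).foldl
    (fun dp i => (List.range' 1 t.length).foldl (stepB s t i) dp) (initDPd s t)

def fillAd (s t : List Char) : List (List Int) × List (List (List Char)) :=
  (List.range' 1 s.length).foldl
    (fun st i => (List.range' 1 t.length).foldl (stepA s t i) st) (initDPd s t, initOPd s t)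

-- the initialization loops produce a well-shaped table that is correct on the boundary
theorem initB_facts (s t : List Char) :
    pvShape s.length t.length (initDPd s t) ∧ dpOK s t (initDPd s t) 1 1 := by
  have hS0 : pvShape s.length t.length (List.replicate (s.length+1) (List.replicate (t.length+1) (0:Int))) := by
    refine ⟨by simp, fun i hi => ?_⟩
    rw [List.getD_eq_getElem?_getD]
    simp [List.getElem?_replicate, hi]
  obtain ⟨hS1, hget1⟩ := foldl_initCol (m := s.length) (n := t.length)
    (fun i => ((i:Nat) : Int)) 0 (s.length+1)
    (List.replicate (s.length+1) (List.replicate (t.length+1) (0:Int))) (le_refl _) hS0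
  obtain ⟨hS2, hget2⟩ := foldl_initRow (m := s.length) (n := t.length)
    (fun j => ((j:Nat) : Int)) 0 (t.length+1) _ (le_refl _) hS1
  simp only [initDPd, pvSet2, pvGet2, dpOK]
  refine ⟨hS2, fun i' j' hi' hj' hproc => ?_⟩
  rw [hget2 i' j', hget1 i' j']
  rcases Nat.eq_zero_or_pos i' with rfl | hipos
  · rcases Nat.eq_zero_or_pos j' with rfl | hjpos
    · simp [dpF]
    · rw [if_pos ⟨rfl, by omega⟩]
      obtain ⟨j₀, rfl⟩ : ∃ j₀, j' = j₀ + 1 := ⟨j' - 1, by omega⟩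
      rw [dpF]; simp
  · have hj0 : j' = 0 := by omega
    subst hj0
    rw [if_neg (by omega), if_pos ⟨rfl, by omega⟩, dpF]

theorem initA_ops_facts (s t : List Char) :
    pvShape s.length t.length (initOPd s t) ∧ opsOK s t (initOPd s t) 1 1 := by
  have hS0 : pvShape s.length t.length (List.replicate (s.length+1) (List.replicate (t.length+1) ([] : List Char))) := by
    refine ⟨by simp, fun i hi => ?_⟩
    rw [List.getD_eq_getElem?_getD]
    simp [List.getElem?_replicate, hi]
  obtain ⟨hS1, hget1⟩ := foldl_initCol (m := s.length) (n := t.length)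
    (fun i => List.replicate i 'D') []
    (s.length+1) (List.replicate (s.length+1) (List.replicate (t.length+1) ([] : List Char))) (le_refl _) hS0
  obtain ⟨hS2, hget2⟩ := foldl_initRow (m := s.length) (n := t.length)
    (fun j => List.replicate j 'I') [] (t.length+1) _ (le_refl _) hS1
  simp only [initOPd, pvSetO, pvGetO, opsOK]
  refine ⟨hS2, fun i' j' hi' hj' hproc => ?_⟩
  rw [hget2 i' j', hget1 i' j']
  rcases Nat.eq_zero_or_pos i' with rfl | hipos
  · rcases Nat.eq_zero_or_pos j' with rfl | hjpos
    · simp [opsF]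
    · rw [if_pos ⟨rfl, by omega⟩]
      obtain ⟨j₀, rfl⟩ : ∃ j₀, j' = j₀ + 1 := ⟨j' - 1, by omega⟩
      rw [opsF]; simp
  · have hj0 : j' = 0 := by omega
    subst hj0
    rw [if_neg (by omega), if_pos ⟨rfl, by omega⟩, opsF]

-- the two ports written through the named fills (definitional)
theorem B_def (S T : String) : modified_edit_distance_alt S T =
    (pvGet2 (fillBd S.toList T.toList) S.toList.length T.toList.length,
     String.mk (pvBack S.toList T.toList (fillBd S.toList T.toList)
       S.toList.length T.toList.length [])) := rfl

theorem A_def (S T : String) : modified_edit_distance S T =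
    (pvGet2 (fillAd S.toList T.toList).1 S.toList.length T.toList.length,
     String.mk (pvGetO (fillAd S.toList T.toList).2 S.toList.length T.toList.length)) := rfl

-- characterisation of port B
theorem B_char (S T : String) : modified_edit_distance_alt S T =
    (dpF S.toList T.toList S.toList.length T.toList.length,
     String.mk (opsF S.toList T.toList S.toList.length T.toList.length)) := by
  obtain ⟨hSi, hOKi⟩ := initB_facts S.toList T.toList
  obtain ⟨hSf, hOKf⟩ := outerB_correct S.toList T.toList S.toList.length 1 _
    (by omega) (by omega) hSi hOKi
  have hall : ∀ i j, i ≤ S.toList.length → j ≤ T.toList.length →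
      pvGet2 (fillBd S.toList T.toList) i j = dpF S.toList T.toList i j := by
    intro i j hi hj
    rw [fillBd]
    exact hOKf i j hi hj (by omega)
  have hback := back_eq S.toList T.toList _ hall (S.toList.length + T.toList.length)
    S.toList.length T.toList.length [] (le_refl _) (le_refl _) (le_refl _)
  rw [B_def, hall _ _ (le_refl _) (le_refl _), hback]
  simp

-- characterisation of port A
theorem A_char (S T : String) : modified_edit_distance S T =
    (dpF S.toList T.toList S.toList.length T.toList.length,
     String.mk (opsF S.toList T.toList S.toList.length T.toList.length)) := by
  obtain ⟨hSdi, hdOKi⟩ := initB_facts S.toList T.toList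
  obtain ⟨hSoi, hoOKi⟩ := initA_ops_facts S.toList T.toList
  obtain ⟨hdOKf, hoOKf⟩ := outerA_correct S.toList T.toList S.toList.length 1
    (initDPd S.toList T.toList, initOPd S.toList T.toList)
    (by omega) (by omega) hSdi hSoi hdOKi hoOKi
  rw [A_def]
  rw [show (fillAd S.toList T.toList) = (List.range' 1 S.toList.length).foldl
    (fun st i => (List.range' 1 T.toList.length).foldl (stepA S.toList T.toList i) st)
    (initDPd S.toList T.toList, initOPd S.toList T.toList) from rfl]
  rw [hdOKf S.toList.length T.toList.length (le_refl _) (le_refl _) (by omega),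
      hoOKf S.toList.length T.toList.length (le_refl _) (le_refl _) (by omega)]

-- ===== VERDICT (by name: the statement is the Claim_ definition above) =====
theorem modified_edit_distance_spec : Claim_equal_modified_edit_distance := by
  unfold Claim_equal_modified_edit_distance
  intro S T _
  unfold Spec_modified_edit_distance
  rw [A_char, B_char]
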